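-- pv_equiv track=rewrite | github.com/peterjabraham/whatsapp-journey-gen | journey_generator.py | extract_prompt_body
-- ===== SOURCE A (Python) =====
-- def extract_prompt_body(prompt_content: str) -> str:
--     """
--     Extract prompt body from markdown content.
--
--     Previously this extracted content from a single code block, but now our prompts
--     contain multiple code blocks (HTML/CSS templates), so we return the full content.
--
--     Only extract from a code block if the ENTIRE content is wrapped in one
--     (starts with ``` on line 1).
--     """
--     lines = prompt_content.strip().split('\n')
--
--     # Only extract if the prompt starts with a code fence (entire content wrapped)
--     if lines and lines[0].strip().startswith('```'):
--         # Find the closing fence and extract content between them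
--         content_lines = []
--         in_block = False
--         for line in lines:
--             if line.strip().startswith('```') and not in_block:
--                 in_block = True
--                 continue
--             elif line.strip() == '```' and in_block:
--                 break
--             elif in_block:
--                 content_lines.append(line)
--         if content_lines:
--             return '\n'.join(content_lines).strip()
--
--     # Otherwise return the full content as-is (prompt contains embedded code blocks)
--     return prompt_content.strip()
-- ===== SOURCE B (Python) =====
-- def extract_prompt_body(prompt_content: str) -> str:
--     lines = prompt_content.strip().split('\n')
--     if lines[0].strip().startswith('```'):
--         # first closing fence after the opening line, or end of input
--         i = next((k for k in range(1, len(lines)) if lines[k].strip() == '```'),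
--                  len(lines))
--         content_lines = lines[1:i]
--         if content_lines:
--             return '\n'.join(content_lines).strip()
--     return prompt_content.strip()
-- ===== Notes on version B (the rewrite author's own statement) =====
-- stated objective: simpler
-- what changed: Replaces the stateful in_block/continue/break scan with a fence-check on line 0, a search for the first closing fence, and one slice lines[1:i].
import Mathlib
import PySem

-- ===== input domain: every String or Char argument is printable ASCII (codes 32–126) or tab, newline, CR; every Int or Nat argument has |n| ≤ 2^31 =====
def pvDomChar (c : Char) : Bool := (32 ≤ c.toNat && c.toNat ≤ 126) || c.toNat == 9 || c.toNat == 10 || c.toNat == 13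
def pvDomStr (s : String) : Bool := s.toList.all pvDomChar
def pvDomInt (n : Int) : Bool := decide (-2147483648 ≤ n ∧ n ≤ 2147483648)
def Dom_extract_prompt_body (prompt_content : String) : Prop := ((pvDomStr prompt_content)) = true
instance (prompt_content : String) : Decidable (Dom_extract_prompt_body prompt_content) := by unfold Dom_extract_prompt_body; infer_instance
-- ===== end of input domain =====

-- B replaces A's stateful in_block scan with: check line 0 is a fence, find the first
-- closing fence, slice lines[1:i] — a simpler decomposition, same O(n) cost.


-- ===== PORT A =====
-- A's for-loop with in_block/continue/break, as structural recursion over the lines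
def pvLoopA : List String → List String → Bool → List String
  | [], content_lines, _ => content_lines
  | line :: rest, content_lines, in_block =>
    if PySem.Str.startswith (PySem.Str.strip line) "```" && !in_block then
      pvLoopA rest content_lines true
    else if PySem.Str.strip line == "```" && in_block then
      content_lines
    else if in_block then
      pvLoopA rest (content_lines ++ [line]) in_block
    else
      pvLoopA rest content_lines in_block

def extract_prompt_body (prompt_content : String) : String :=
  let lines := (PySem.Str.split? (PySem.Str.strip prompt_content) "\n").getD []
  if !lines.isEmpty && PySem.Str.startswith (PySem.Str.strip (lines.headD "")) "```" then
    let content_lines := pvLoopA lines [] false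
    if !content_lines.isEmpty then
      PySem.Str.strip (PySem.Str.join "\n" content_lines)
    else
      PySem.Str.strip prompt_content
  else
    PySem.Str.strip prompt_content

-- ===== PORT B =====
def extract_prompt_body_alt (prompt_content : String) : String :=
  let lines := (PySem.Str.split? (PySem.Str.strip prompt_content) "\n").getD []
  if PySem.Str.startswith (PySem.Str.strip (lines.headD "")) "```" then
    -- i = next((k for k in range(1, len(lines)) if lines[k].strip() == '```'), len(lines))
    let i : Nat := match (lines.drop 1).findIdx? (fun l => PySem.Str.strip l == "```") with
      | some k => k + 1
      | none => lines.length
    let content_lines := (lines.drop 1).take (i - 1)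
    if !content_lines.isEmpty then
      PySem.Str.strip (PySem.Str.join "\n" content_lines)
    else
      PySem.Str.strip prompt_content
  else
    PySem.Str.strip prompt_content

-- ===== PRECONDITION & SPEC =====
def Spec_extract_prompt_body (prompt_content : String) (out : String) : Prop := out = extract_prompt_body_alt prompt_content
instance (prompt_content : String) (out : String) : Decidable (Spec_extract_prompt_body prompt_content out) := by unfold Spec_extract_prompt_body; infer_instance

-- ===== CLAIM (what is proved, stated in full; the proofs are below) =====
def Claim_equal_extract_prompt_body : Prop := ∀ (prompt_content : String), Dom_extract_prompt_body prompt_content → Spec_extract_prompt_body prompt_content (extract_prompt_body prompt_content)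

-- ===== LEMMAS AND PROOFS =====

-- with in_block already set, A's loop collects lines up to the first exact closing fence
theorem pvLoopA_true (r : List String) (acc : List String) :
    pvLoopA r acc true = acc ++ r.takeWhile (fun l => !(PySem.Str.strip l == "```")) := by
  induction r generalizing acc with
  | nil => simp [pvLoopA]
  | cons l rest ih =>
    by_cases h : PySem.Str.strip l == "```"
    · simp [pvLoopA, h, List.takeWhile]
    · simp only [pvLoopA, h]
      simp [List.takeWhile, h, ih]

-- B's slice lines[1:i] equals the takeWhile up to the first closing fence
theorem take_findIdx (r : List String) :
    r.take ((match r.findIdx? (fun l => PySem.Str.strip l == "```") with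
              | some k => k + 1
              | none => r.length + 1) - 1)
      = r.takeWhile (fun l => !(PySem.Str.strip l == "```")) := by
  induction r with
  | nil => simp
  | cons l rest ih =>
    by_cases h : PySem.Str.strip l == "```"
    · simp [List.findIdx?_cons, h]
    · cases hf : rest.findIdx? (fun l => PySem.Str.strip l == "```") with
      | some k =>
        rw [hf] at ih
        simp only [Nat.add_sub_cancel] at ih
        simp [List.findIdx?_cons, h, hf, ih]
      | none =>
        rw [hf] at ih
        simp only [Nat.add_sub_cancel] at ih
        simp [List.findIdx?_cons, h, hf, ih]

-- ===== VERDICT (by name: the statement is the Claim_ definition above) =====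
theorem extract_prompt_body_spec : Claim_equal_extract_prompt_body := by
  intro p _
  unfold Spec_extract_prompt_body extract_prompt_body extract_prompt_body_alt
  cases hl : (PySem.Str.split? (PySem.Str.strip p) "\n").getD [] with
  | nil => simp
  | cons l0 rest =>
    by_cases hb : PySem.Str.startswith (PySem.Str.strip l0) "```" = true
    · have hb' : PySem.Chars.startswith (PySem.Chars.strip l0.toList) ['`', '`', '`'] = true := by
        simpa using hb
      have hloop : pvLoopA (l0 :: rest) [] false
          = rest.takeWhile (fun l => !(PySem.Str.strip l == "```")) := by
        simp [pvLoopA, hb', pvLoopA_true]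
      have htake := take_findIdx rest
      simp only [List.headD_cons, List.isEmpty_cons, Bool.not_false, Bool.true_and,
        List.drop_succ_cons, List.drop_zero, List.length_cons, hb, if_true, hloop, htake]
    · simp only [List.headD_cons, List.isEmpty_cons, Bool.not_false, Bool.true_and,
        if_neg hb]
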